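-- pv_equiv track=rewrite | github.com/codenie/g1-ppo-symm | rsl_rl/rsl_rl/modules/actor_critic_half_symmetry.py | generate_swapped_indices
-- ===== SOURCE A (Python) =====
-- def generate_swapped_indices(x, y):
--     """
--     输入：
--         x (list): 对称的x坐标列表(例如 [-2, -1, 0, 1, 2])
--         y (list): y坐标列表(例如 [-1, 0, 1])
--     输出：
--         swapped_L (list): 按x坐标取反对称交换后的索引数组
--     """
--     len_x = len(x)
--     len_y = len(y)
--     total_points = len_x * len_y
--
--     # 生成初始顺序的索引数组 L = [0, 1, 2, ..., total_points-1]
--     L = list(range(total_points))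
--
--     # 计算每个索引i对应的新位置j
--     swapped_L = []
--     for i in range(total_points):
--         # 当前索引i对应的x和y的网格位置
--         i_x = i // len_y   # x在x列表中的索引（行号）
--         i_y = i % len_y    # y在y列表中的索引（列号）
--
--         # 计算x取反后的新x索引（对称位置）
--         new_x_index = len_x - 1 - i_x
--
--         # 计算新位置j
--         j = new_x_index * len_y + i_y
--
--         # 将原L[j]的值存入swapped_L[i]
--         swapped_L.append(L[j])
--
--     return swapped_L
-- ===== SOURCE B (Python) =====
-- def generate_swapped_indices(x, y):
--     len_x = len(x)
--     len_y = len(y)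
--     # build one contiguous index block per x-row, then emit the blocks in reversed row order
--     rows = [list(range(r * len_y, (r + 1) * len_y)) for r in range(len_x)]
--     swapped = []
--     for row in reversed(rows):
--         swapped.extend(row)
--     return swapped
-- ===== Notes on version B (the rewrite author's own statement) =====
-- stated objective: simpler
-- what changed: Replaces the flat per-element div/mod loop with building contiguous per-row index blocks and concatenating them in reversed row order.
import Mathlib
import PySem

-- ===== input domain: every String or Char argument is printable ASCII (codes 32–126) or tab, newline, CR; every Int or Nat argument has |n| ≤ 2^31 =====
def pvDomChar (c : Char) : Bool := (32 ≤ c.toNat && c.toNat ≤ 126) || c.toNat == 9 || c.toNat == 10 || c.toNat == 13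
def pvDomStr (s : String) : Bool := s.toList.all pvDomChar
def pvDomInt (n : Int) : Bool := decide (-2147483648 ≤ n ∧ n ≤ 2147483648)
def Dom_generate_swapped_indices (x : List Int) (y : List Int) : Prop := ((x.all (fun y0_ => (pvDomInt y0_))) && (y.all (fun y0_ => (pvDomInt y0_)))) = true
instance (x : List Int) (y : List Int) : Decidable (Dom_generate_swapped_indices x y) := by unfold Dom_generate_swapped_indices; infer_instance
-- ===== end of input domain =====

-- B builds the per-row index blocks and concatenates them in reversed row order,
-- instead of A's flat loop computing each entry by div/mod (objective: simpler).

-- ===== PORT A =====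
def generate_swapped_indices (x : List Int) (y : List Int) : List Int :=
  let len_x : Int := x.length
  let len_y : Int := y.length
  let total_points : Int := len_x * len_y
  let L : List Int := PySem.List.pyRange 0 total_points 1
  -- L[j] is always in range (0 ≤ j < total_points), so the default 0 is never taken
  (PySem.List.pyRange 0 total_points 1).foldl (fun swapped_L i =>
    let i_x := PySem.Int.floordiv i len_y
    let i_y := PySem.Int.mod i len_y
    let new_x_index := len_x - 1 - i_x
    let j := new_x_index * len_y + i_y
    swapped_L ++ [PySem.List.pyGetD L j 0]) []

-- ===== PORT B =====
def generate_swapped_indices_alt (x : List Int) (y : List Int) : List Int :=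
  let len_x : Nat := x.length
  let len_y : Int := y.length
  let rows : List (List Int) :=
    (List.range len_x).map (fun (r : ℕ) => PySem.List.pyRange ((r : Int) * len_y) (((r : Int) + 1) * len_y) 1)
  rows.reverse.foldl (fun swapped row => swapped ++ row) []

-- ===== PRECONDITION & SPEC =====
def Spec_generate_swapped_indices (x : List Int) (y : List Int) (out : List Int) : Prop := out = generate_swapped_indices_alt x y
instance (x : List Int) (y : List Int) (out : List Int) : Decidable (Spec_generate_swapped_indices x y out) := by unfold Spec_generate_swapped_indices; infer_instance

-- ===== CLAIM (what is proved, stated in full; the proofs are below) =====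
def Claim_equal_generate_swapped_indices : Prop := ∀ (x : List Int) (y : List Int), Dom_generate_swapped_indices x y → Spec_generate_swapped_indices x y (generate_swapped_indices x y)

-- ===== LEMMAS AND PROOFS =====

-- mod/floordiv bounds for a positive divisor
theorem pv_mod_bounds (i m : Int) (hm : 0 < m) :
    0 ≤ PySem.Int.mod i m ∧ PySem.Int.mod i m < m := by
  rw [PySem.Int.mod_eq_emod_of_pos hm]
  exact ⟨Int.emod_nonneg i (ne_of_gt hm), Int.emod_lt_of_pos i hm⟩

-- The mapped-block characterisation of A's loop: block r of the flat range maps to row c - r.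
theorem pv_blocks (n m : ℕ) (c : Int) :
    (PySem.List.pyRange 0 ((n : Int) * m) 1).map
      (fun i => (c - PySem.Int.floordiv i m) * m + PySem.Int.mod i m)
    = ((List.range n).map
        (fun r : ℕ => PySem.List.pyRange ((c - (r : Int)) * m) ((c - (r : Int)) * m + m) 1)).flatten := by
  induction n with
  | zero => simp [PySem.List.pyRange_one_eq_nil]
  | succ n ih =>
    by_cases hm : m = 0
    · subst hm
      simp [PySem.List.pyRange_one_eq_nil]
    · have hm' : (0 : Int) < (m : Int) := by exact_mod_cast Nat.pos_of_ne_zero hm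
      have hsplit : PySem.List.pyRange 0 (((n + 1 : ℕ) : Int) * m) 1
          = PySem.List.pyRange 0 ((n : Int) * m) 1
            ++ PySem.List.pyRange ((n : Int) * m) (((n + 1 : ℕ) : Int) * m) 1 := by
        refine PySem.List.pyRange_one_append 0 ((n : Int) * m) _ (by positivity) ?_
        push_cast; nlinarith
      rw [hsplit, List.map_append, ih, List.range_succ, List.map_append, List.flatten_append]
      congr 1
      simp only [List.map_singleton, List.flatten_cons, List.flatten_nil, List.append_nil]
      rw [PySem.List.pyRange_one ((n : Int) * m) (((n + 1 : ℕ) : Int) * m),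
          PySem.List.pyRange_one ((c - (n : Int)) * m) ((c - (n : Int)) * m + m), List.map_map]
      have hlen : (((n + 1 : ℕ) : Int) * m - (n : Int) * m).toNat = m := by
        rw [show (((n+1:ℕ)) : Int) * m - (n : Int) * m = (m : Int) by push_cast; ring]
        omega
      have hlen2 : ((c - (n : Int)) * m + m - (c - (n : Int)) * m).toNat = m := by omega
      rw [hlen, hlen2]
      refine List.map_congr_left (fun k hk => ?_)
      rw [List.mem_range] at hk
      have hk' : (k : Int) < m := by exact_mod_cast hk
      have hdiv : PySem.Int.floordiv ((n : Int) * m + k) m = n := by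
        rw [PySem.Int.floordiv_eq_iff_of_pos hm']
        constructor
        · nlinarith [Int.natCast_nonneg k]
        · nlinarith
      have hmod : PySem.Int.mod ((n : Int) * m + k) m = k := by
        have h := PySem.Int.floordiv_mul_add_mod ((n : Int) * m + k) m
        rw [hdiv] at h
        omega
      simp only [Function.comp, hdiv, hmod]

theorem pv_reverse_range (n : ℕ) :
    (List.range n).reverse = (List.range n).map (fun i => n - 1 - i) := by
  apply List.ext_getElem
  · simp
  · intro i h1 h2
    simp only [List.getElem_reverse, List.getElem_map, List.getElem_range,
      List.length_range] at *

theorem pv_pyGetD_pyRange_zero (t j : Int) (h0 : 0 ≤ j) (h1 : j < t) :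
    PySem.List.pyGetD (PySem.List.pyRange 0 t 1) j 0 = j := by
  have hj : j = ((j.toNat : ℕ) : Int) := by omega
  rw [hj, PySem.List.pyGetD_natCast]
  have hlen : (PySem.List.pyRange 0 t 1).length = (t - 0).toNat := PySem.List.length_pyRange_one 0 t
  have hk : j.toNat < (PySem.List.pyRange 0 t 1).length := by omega
  rw [List.getD_eq_getElem _ _ hk, PySem.List.getElem_pyRange_one]
  omega

-- ===== VERDICT (by name: the statement is the Claim_ definition above) =====
theorem generate_swapped_indices_spec : Claim_equal_generate_swapped_indices := by
  intro x y _
  unfold Spec_generate_swapped_indices generate_swapped_indices generate_swapped_indices_alt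
  simp only []
  set n := x.length with hn
  set m := y.length with hmm
  rw [PySem.List.foldl_append_singleton_eq_map, PySem.List.foldl_append_eq_flatten]
  simp only [List.nil_append]
  have hA : (PySem.List.pyRange 0 ((n : Int) * m) 1).map
      (fun i => PySem.List.pyGetD (PySem.List.pyRange 0 ((n : Int) * m) 1)
        (((n : Int) - 1 - PySem.Int.floordiv i m) * m + PySem.Int.mod i m) 0)
      = (PySem.List.pyRange 0 ((n : Int) * m) 1).map
      (fun i => ((n : Int) - 1 - PySem.Int.floordiv i m) * m + PySem.Int.mod i m) := by
    refine List.map_congr_left (fun i hi => ?_)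
    rw [PySem.List.mem_pyRange_one] at hi
    have hm0 : 0 < (m : Int) := by
      rcases hi with ⟨h0, h1⟩
      by_contra h
      have hle : (m : Int) ≤ 0 := by omega
      have : (n : Int) * m ≤ 0 := mul_nonpos_of_nonneg_of_nonpos (by positivity) hle
      omega
    obtain ⟨hmod0, hmodlt⟩ := pv_mod_bounds i m hm0
    have hqm : PySem.Int.floordiv i m * m + PySem.Int.mod i m = i :=
      PySem.Int.floordiv_mul_add_mod i m
    have hdiv0 : 0 ≤ PySem.Int.floordiv i m := by nlinarith [hi.1]
    have hdivlt : PySem.Int.floordiv i m < n := by nlinarith [hi.2]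
    exact pv_pyGetD_pyRange_zero _ _ (by nlinarith) (by nlinarith)
  rw [hA, pv_blocks n m ((n : Int) - 1)]
  rw [← List.map_reverse, pv_reverse_range, List.map_map]
  congr 1
  refine List.map_congr_left (fun r hr => ?_)
  rw [List.mem_range] at hr
  simp only [Function.comp]
  have h1 : ((n - 1 - r : ℕ) : Int) = (n : Int) - 1 - r := by omega
  rw [h1]
  congr 1
  ring
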